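-- pv_equiv track=rewrite | github.com/Omnicode786/Cis-2024-Muzammil | LinkedINDSA/Queues/ex1.py | generateusingQUEUE
-- ===== SOURCE A (Python) =====
-- from collections import deque
--
-- def generateusingQUEUE(n):
--     queue = deque()
--     queue.append(1)
--     result = []
--     for i in range(n):
--         num = queue.popleft()       # O(1)
--         result.append(num)
--         queue.append(num * 10)      # O(1)
--         queue.append(num * 10 + 1)  # O(1)
--     return result
-- ===== SOURCE B (Python) =====
-- def generateusingQUEUE(n):
--     # k-th output (1-based k) is the number whose decimal digits are the
--     # binary digits of k; compute it directly, no queue needed.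
--     def f(i):
--         return i if i < 2 else 10 * f(i // 2) + i % 2
--     return [f(i) for i in range(1, n + 1)]
-- ===== Notes on version B (the rewrite author's own statement) =====
-- stated objective: simpler
-- what changed: Replaces the BFS over a deque (pop, append num*10 and num*10+1) by a direct per-index closed form: element k-1 is the number whose decimal digits are the binary digits of k, computed by a small recursion, in a plain list comprehension.
import Mathlib
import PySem

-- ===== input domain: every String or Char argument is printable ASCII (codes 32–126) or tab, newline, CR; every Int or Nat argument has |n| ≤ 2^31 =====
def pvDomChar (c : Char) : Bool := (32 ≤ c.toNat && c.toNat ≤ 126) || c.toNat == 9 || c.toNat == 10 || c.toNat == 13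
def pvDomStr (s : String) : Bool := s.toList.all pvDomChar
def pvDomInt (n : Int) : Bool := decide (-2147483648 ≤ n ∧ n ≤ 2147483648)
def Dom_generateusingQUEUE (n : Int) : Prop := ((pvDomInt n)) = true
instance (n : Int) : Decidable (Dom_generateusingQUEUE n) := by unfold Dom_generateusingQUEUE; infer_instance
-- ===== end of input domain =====

-- B replaces A's deque-BFS by a direct per-index digit recursion (simpler; same output).

-- ===== PORT A =====
-- for i in range(n): num = queue.popleft(); result.append(num); queue.append(num*10); queue.append(num*10+1)
-- The queue is never empty here (starts with one element, each step removes one and adds two);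
-- the [] branch is unreachable (Python would raise IndexError there).
def pvLoopA : Nat → List Int → List Int → List Int
  | 0, _, result => result
  | m + 1, queue, result =>
    match queue with
    | [] => result
    | num :: rest => pvLoopA m (rest ++ [num * 10, num * 10 + 1]) (result ++ [num])

def generateusingQUEUE (n : Int) : List Int :=
  pvLoopA n.toNat [1] []

-- ===== PORT B =====
-- f(i) = i if i < 2 else 10 * f(i // 2) + i % 2 ; arguments come from range(1, n+1), so i ≥ 1
-- and Python's // and % on nonnegative ints coincide with Nat division/mod after toNat.
def pvF (i : Nat) : Int :=
  if i < 2 then (i : Int)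
  else 10 * pvF (i / 2) + ((i % 2 : Nat) : Int)
decreasing_by exact Nat.div_lt_self (by omega) (by omega)

def generateusingQUEUE_alt (n : Int) : List Int :=
  (PySem.List.pyRange 1 (n + 1) 1).map (fun i => pvF i.toNat)

-- ===== PRECONDITION & SPEC =====
def Spec_generateusingQUEUE (n : Int) (out : List Int) : Prop := out = generateusingQUEUE_alt n
instance (n : Int) (out : List Int) : Decidable (Spec_generateusingQUEUE n out) := by unfold Spec_generateusingQUEUE; infer_instance

-- ===== CLAIM (what is proved, stated in full; the proofs are below) =====
def Claim_equal_generateusingQUEUE : Prop := ∀ (n : Int), Dom_generateusingQUEUE n → Spec_generateusingQUEUE n (generateusingQUEUE n)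

-- ===== LEMMAS AND PROOFS =====

theorem pvF_even (m : Nat) (h : 1 ≤ m) : pvF (2 * m) = 10 * pvF m := by
  rw [pvF]
  have h2 : ¬ 2 * m < 2 := by omega
  simp [h2, Nat.mul_div_cancel_left m (by norm_num : 0 < 2), Nat.mul_mod_right]

theorem pvF_odd (m : Nat) (h : 1 ≤ m) : pvF (2 * m + 1) = 10 * pvF m + 1 := by
  rw [pvF]
  have h2 : ¬ 2 * m + 1 < 2 := by omega
  have hd : (2 * m + 1) / 2 = m := by omega
  have hm : (2 * m + 1) % 2 = 1 := by omega
  simp [h2, hd, hm]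

-- BFS invariant: after popping j elements the queue holds f(j+1) … f(2j+1).
theorem pvLoopA_inv (m : Nat) : ∀ (j : Nat) (res : List Int),
    pvLoopA m ((List.range' (j + 1) (j + 1)).map pvF) res
      = res ++ (List.range' (j + 1) m).map pvF := by
  induction m with
  | zero => intro j res; simp [pvLoopA]
  | succ m ih =>
    intro j res
    have hq : List.range' (j + 1) (j + 1) = (j + 1) :: List.range' (j + 2) j := by
      rw [List.range'_succ]
    rw [hq]
    simp only [List.map_cons, pvLoopA]
    have e1 : pvF (2 * (j + 1)) = pvF (j + 1) * 10 := by
      rw [pvF_even (j + 1) (by omega)]; ring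
    have e2 : pvF (2 * (j + 1) + 1) = pvF (j + 1) * 10 + 1 := by
      rw [pvF_odd (j + 1) (by omega)]; ring
    have hpair : [pvF (j + 1) * 10, pvF (j + 1) * 10 + 1]
        = (List.map pvF [2 * (j + 1), 2 * (j + 1) + 1]) := by
      simp [e1, e2]
    rw [hpair, ← List.map_append]
    have hr : List.range' (j + 2) j ++ [2 * (j + 1), 2 * (j + 1) + 1]
        = List.range' (j + 2) (j + 2) := by
      have h1 := List.range'_concat (s := j + 2) (n := j + 1) (step := 1)
      have h2 := List.range'_concat (s := j + 2) (n := j) (step := 1)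
      rw [show j + 2 = j + 1 + 1 from rfl, h1, h2]
      simp [List.append_assoc]
      constructor <;> omega
    rw [hr, ih (j + 1)]
    have hs : List.range' (j + 1) (m + 1) = (j + 1) :: List.range' (j + 2) m := by
      rw [List.range'_succ]
    rw [hs]
    simp

theorem generateusingQUEUE_eq (n : Int) :
    generateusingQUEUE n = (List.range' 1 n.toNat).map pvF := by
  unfold generateusingQUEUE
  have h1 : ([1] : List Int) = (List.range' 1 1).map pvF := by
    simp [List.range'_succ, pvF]
  rw [h1]
  simpa using pvLoopA_inv n.toNat 0 []

theorem generateusingQUEUE_alt_eq (n : Int) :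
    generateusingQUEUE_alt n = (List.range' 1 n.toNat).map pvF := by
  unfold generateusingQUEUE_alt
  rw [PySem.List.pyRange_one]
  have hb : (n + 1 - 1 : Int).toNat = n.toNat := by omega
  rw [hb, List.range'_eq_map_range]
  simp only [List.map_map]
  apply List.map_congr_left
  intro k _
  have hk : ((1 : Int) + k).toNat = 1 + k := by omega
  simp [Function.comp, hk]

-- ===== VERDICT (by name: the statement is the Claim_ definition above) =====
theorem generateusingQUEUE_spec : Claim_equal_generateusingQUEUE := by
  intro n _
  unfold Spec_generateusingQUEUE
  rw [generateusingQUEUE_eq, generateusingQUEUE_alt_eq]
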